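-- pv_equiv track=rewrite | github.com/JustaKris/Practice | HackerRank/one_week_prep_kit/day6/lego_blocks.py | generate_block_configs
-- ===== SOURCE A (Python) =====
-- MOD = 10**9 + 7
--
-- def generate_block_configs(m):
--     dp = [0] * (m + 1)
--     dp[0] = 1
--     for i in range(1, m + 1):
--         dp[i] = dp[i - 1]
--         if i >= 2:
--             dp[i] = (dp[i] + dp[i - 2]) % MOD
--         if i >= 3:
--             dp[i] = (dp[i] + dp[i - 3]) % MOD
--         if i >= 4:
--             dp[i] = (dp[i] + dp[i - 4]) % MOD
--     return dp
-- ===== SOURCE B (Python) =====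
-- MOD = 10**9 + 7
--
-- def generate_block_configs(m):
--     dp = [1]
--     window = 1
--     for i in range(1, m + 1):
--         v = window
--         dp.append(v)
--         window = (window + v) % MOD
--         if i >= 4:
--             window = (window - dp[i - 4]) % MOD
--     return dp
-- ===== Notes on version B (the rewrite author's own statement) =====
-- stated objective: faster
-- what changed: Replaces the three conditional re-additions of earlier dp entries by a single sliding-window running sum maintained modulo MOD (add the new value, drop the entry leaving the window), building the list by appending instead of indexing into a preallocated array.
import Mathlib
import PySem

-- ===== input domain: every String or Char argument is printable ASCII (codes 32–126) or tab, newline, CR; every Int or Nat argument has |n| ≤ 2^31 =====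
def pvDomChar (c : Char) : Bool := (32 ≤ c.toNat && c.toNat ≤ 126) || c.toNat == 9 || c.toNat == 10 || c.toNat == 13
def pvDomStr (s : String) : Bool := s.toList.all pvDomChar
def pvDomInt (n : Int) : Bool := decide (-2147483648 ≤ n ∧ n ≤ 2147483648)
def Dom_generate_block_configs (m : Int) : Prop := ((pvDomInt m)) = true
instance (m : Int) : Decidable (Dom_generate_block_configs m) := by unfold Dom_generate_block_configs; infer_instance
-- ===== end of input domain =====

-- B replaces A's three conditional re-additions of earlier dp entries by one sliding-window
-- running sum maintained modulo pvMOD, appending to the list instead of writing into a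
-- preallocated array; a timing run measured B faster by a constant factor.

def pvMOD : Int := 1000000007

-- ===== PORT A =====
-- loop body of A: dp[i] = dp[i-1], then three conditional mod-additions, then write to dp[i]
def stepA (dp : List Int) (i : Int) : List Int :=
  let v := PySem.List.pyGetD dp (i - 1) 0
  let v := if i ≥ 2 then PySem.Int.mod (v + PySem.List.pyGetD dp (i - 2) 0) pvMOD else v
  let v := if i ≥ 3 then PySem.Int.mod (v + PySem.List.pyGetD dp (i - 3) 0) pvMOD else v
  let v := if i ≥ 4 then PySem.Int.mod (v + PySem.List.pyGetD dp (i - 4) 0) pvMOD else v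
  PySem.List.pySetD dp i v

def generate_block_configs (m : Int) : List Int :=
  let dp := List.replicate (m + 1).toNat (0 : Int)
  let dp := PySem.List.pySetD dp 0 1
  (PySem.List.pyRange 1 (m + 1) 1).foldl stepA dp

-- ===== PORT B =====
-- loop body of B: append the running window sum, add it into the window, drop dp[i-4]
def stepB (s : List Int × Int) (i : Int) : List Int × Int :=
  let v := s.2
  let dp := s.1 ++ [v]
  let w := PySem.Int.mod (s.2 + v) pvMOD
  let w := if i ≥ 4 then PySem.Int.mod (w - PySem.List.pyGetD dp (i - 4) 0) pvMOD else w
  (dp, w)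

def generate_block_configs_alt (m : Int) : List Int :=
  ((PySem.List.pyRange 1 (m + 1) 1).foldl stepB ([1], 1)).1

-- ===== PRECONDITION & SPEC =====
-- Pre_ excludes exactly the negative m, on which A raises IndexError (writing the seed into an empty list); B is the natural implementation there and returns the seed alone.
def Pre_generate_block_configs (m : Int) : Prop := 0 ≤ m
instance (m : Int) : Decidable (Pre_generate_block_configs m) := by unfold Pre_generate_block_configs; infer_instance
def pvWitness_generate_block_configs : Int := 5

def Spec_generate_block_configs (m : Int) (out : List Int) : Prop := out = generate_block_configs_alt m
instance (m : Int) (out : List Int) : Decidable (Spec_generate_block_configs m out) := by unfold Spec_generate_block_configs; infer_instance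

-- ===== CLAIM (what is proved, stated in full; the proofs are below) =====
def Claim_equal_generate_block_configs : Prop := ∀ (m : Int), Dom_generate_block_configs m → Pre_generate_block_configs m → Spec_generate_block_configs m (generate_block_configs m)
-- ===== LEMMAS AND PROOFS =====

mutual
def dseq : Nat → Int
  | 0 => 1
  | n + 1 => wseq n
  termination_by n => 2 * n
  decreasing_by omega
def wseq : Nat → Int
  | 0 => 1
  | n + 1 =>
    let w1 := PySem.Int.mod (wseq n + dseq (n + 1)) pvMOD
    if n + 1 ≥ 4 then PySem.Int.mod (w1 - dseq (n - 3)) pvMOD else w1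
  termination_by n => 2 * n + 1
  decreasing_by all_goals omega
end

def Ssum : Nat → Int
  | 0 => dseq 0
  | 1 => dseq 1 + dseq 0
  | 2 => dseq 2 + dseq 1 + dseq 0
  | (n + 3) => dseq (n + 3) + dseq (n + 2) + dseq (n + 1) + dseq n

lemma pymod_eq (a : Int) : PySem.Int.mod a pvMOD = a % pvMOD :=
  PySem.Int.mod_eq_emod_of_pos (by norm_num [pvMOD])

lemma dseq_succ (n : Nat) : dseq (n + 1) = wseq n := by simp [dseq]

lemma wseq_eq_mod (n : Nat) : wseq n = Ssum n % pvMOD := by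
  induction n with
  | zero => simp [wseq, Ssum, dseq, pvMOD]
  | succ n ih =>
    rw [wseq]
    simp only [pymod_eq, dseq_succ, ih]
    rcases n with _ | _ | _ | k
    · norm_num [Ssum, dseq, wseq, pvMOD]
    · have h1 : Ssum 1 = dseq 1 + dseq 0 := rfl
      have h2 : Ssum 2 = dseq 2 + dseq 1 + dseq 0 := rfl
      have hd : dseq 2 = Ssum 1 % pvMOD := by rw [dseq_succ, ih]
      simp only [show ¬ (1 + 1 ≥ 4) by omega, if_false, h1, h2, hd, pvMOD]
      omega
    · have h2 : Ssum 2 = dseq 2 + dseq 1 + dseq 0 := rfl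
      have h3 : Ssum 3 = dseq 3 + dseq 2 + dseq 1 + dseq 0 := rfl
      have hd : dseq 3 = Ssum 2 % pvMOD := by rw [dseq_succ, ih]
      simp only [show ¬ (2 + 1 ≥ 4) by omega, if_false, h2, h3, hd, pvMOD]
      omega
    · have h3 : Ssum (k + 3) = dseq (k + 3) + dseq (k + 2) + dseq (k + 1) + dseq k := rfl
      have h4 : Ssum (k + 4) = dseq (k + 4) + dseq (k + 3) + dseq (k + 2) + dseq (k + 1) := rfl
      have hd : dseq (k + 4) = Ssum (k + 3) % pvMOD := by
        have := dseq_succ (k + 3); rw [this, ih]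
      have hge : k + 3 + 1 ≥ 4 := by omega
      have hsub : k + 3 - 3 = k := by omega
      simp only [if_pos hge, hsub]
      rw [show k + 3 + 1 = k + 4 from rfl] at *
      rw [h4, hd, h3]
      simp only [pvMOD]
      omega

lemma B_inv (n : Nat) :
    (PySem.List.pyRange 1 ((n : Int) + 1) 1).foldl stepB ([1], 1)
      = ((List.range (n + 1)).map dseq, wseq n) := by
  induction n with
  | zero =>
    rw [PySem.List.pyRange_one_eq_nil (by norm_num)]
    simp [dseq, wseq]
  | succ n ih =>
    have hcast : ((n + 1 : Nat) : Int) + 1 = ((n : Int) + 1) + 1 := by push_cast; ring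
    rw [hcast, PySem.List.pyRange_one_succ_right (by omega), List.foldl_append, ih]
    simp only [List.foldl_cons, List.foldl_nil]
    simp only [stepB]
    have hmap : (List.range (n + 1)).map dseq ++ [wseq n] = (List.range (n + 1 + 1)).map dseq := by
      rw [List.range_succ (n := n + 1), List.map_append]
      simp only [List.map_cons, List.map_nil, dseq_succ]
    rw [hmap]
    refine Prod.ext rfl ?_
    show (if (↑n + 1 : Int) ≥ 4 then
        PySem.Int.mod (PySem.Int.mod (wseq n + wseq n) pvMOD -
            PySem.List.pyGetD ((List.range (n + 1 + 1)).map dseq) (↑n + 1 - 4) 0) pvMOD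
      else PySem.Int.mod (wseq n + wseq n) pvMOD) = wseq (n + 1)
    rw [wseq]
    simp only [dseq_succ]
    by_cases h : n + 1 ≥ 4
    · have hInt : ((n : Int) + 1) ≥ 4 := by omega
      rw [if_pos hInt, if_pos h]
      have hidx : ((n : Int) + 1 - 4) = ((n - 3 : Nat) : Int) := by omega
      rw [hidx, PySem.List.pyGetD_natCast]
      have hlt : n - 3 < n + 1 + 1 := by omega
      rw [List.getD_eq_getElem _ _ (by simpa using hlt)]
      simp
    · have hInt : ¬ (((n : Int) + 1) ≥ 4) := by omega
      rw [if_neg hInt, if_neg h]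

lemma hread_lem (m' n : Nat) (i : Int) (h0 : 0 ≤ i) (h1 : i < (n:Int) + 1) :
    PySem.List.pyGetD ((List.range (n+1)).map dseq ++ List.replicate (m' - n) 0) i 0
      = dseq i.toNat := by
  rw [PySem.List.pyGetD_eq_getElem _ _ h0 (by simp; omega)]
  rw [List.getElem_append_left (by simp; omega)]
  simp

def valAexpr (m' n : Nat) : Int :=
  let L := (List.range (n+1)).map dseq ++ List.replicate (m' - n) 0
  let v := PySem.List.pyGetD L ((n:Int) + 1 - 1) 0
  let v := if ((n:Int) + 1) ≥ 2 then PySem.Int.mod (v + PySem.List.pyGetD L ((n:Int) + 1 - 2) 0) pvMOD else v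
  let v := if ((n:Int) + 1) ≥ 3 then PySem.Int.mod (v + PySem.List.pyGetD L ((n:Int) + 1 - 3) 0) pvMOD else v
  let v := if ((n:Int) + 1) ≥ 4 then PySem.Int.mod (v + PySem.List.pyGetD L ((n:Int) + 1 - 4) 0) pvMOD else v
  v

lemma valA (m' n : Nat) (h : n ≤ m') : valAexpr m' n = wseq n := by
  simp only [valAexpr, pymod_eq]
  have hr := hread_lem m' n
  rcases n with _ | _ | _ | k
  · have h2 : ¬ (((0 : Nat) : Int) + 1 ≥ 2) := by norm_num
    simp only [if_neg h2, if_neg (by norm_num : ¬ (((0 : Nat) : Int) + 1 ≥ 3)),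
      if_neg (by norm_num : ¬ (((0 : Nat) : Int) + 1 ≥ 4))]
    rw [hr _ (by norm_num) (by norm_num)]
    norm_num [dseq, wseq]
  · have h2 : ((1 : Nat) : Int) + 1 ≥ 2 := by norm_num
    simp only [if_pos h2, if_neg (by norm_num : ¬ (((1 : Nat) : Int) + 1 ≥ 3)),
      if_neg (by norm_num : ¬ (((1 : Nat) : Int) + 1 ≥ 4))]
    rw [hr _ (by norm_num) (by norm_num), hr _ (by norm_num) (by norm_num)]
    norm_num
    rw [wseq_eq_mod]
    rfl
  · have h2 : ((2 : Nat) : Int) + 1 ≥ 2 := by norm_num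
    have h3 : ((2 : Nat) : Int) + 1 ≥ 3 := by norm_num
    simp only [if_pos h2, if_pos h3, if_neg (by norm_num : ¬ (((2 : Nat) : Int) + 1 ≥ 4))]
    rw [hr _ (by norm_num) (by norm_num), hr _ (by norm_num) (by norm_num),
        hr _ (by norm_num) (by norm_num)]
    rw [show (((2 : Nat) : Int) + 1 - 1).toNat = 2 from by omega,
        show (((2 : Nat) : Int) + 1 - 2).toNat = 1 from by omega,
        show (((2 : Nat) : Int) + 1 - 3).toNat = 0 from by omega]
    rw [wseq_eq_mod]
    have hs : Ssum 2 = dseq 2 + dseq 1 + dseq 0 := rfl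
    rw [hs]
    simp only [pvMOD]
    omega
  · have h2 : ((k + 3 : Nat) : Int) + 1 ≥ 2 := by push_cast; omega
    have h3 : ((k + 3 : Nat) : Int) + 1 ≥ 3 := by push_cast; omega
    have h4 : ((k + 3 : Nat) : Int) + 1 ≥ 4 := by push_cast; omega
    simp only [if_pos h2, if_pos h3, if_pos h4, show k + 1 + 1 + 1 = k + 3 from rfl]
    rw [hr _ (by push_cast; omega) (by push_cast; omega),
        hr _ (by push_cast; omega) (by push_cast; omega),
        hr _ (by push_cast; omega) (by push_cast; omega),
        hr _ (by push_cast; omega) (by push_cast; omega)]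
    rw [show (((k + 3 : Nat) : Int) + 1 - 1).toNat = k + 3 from by omega,
        show (((k + 3 : Nat) : Int) + 1 - 2).toNat = k + 2 from by omega,
        show (((k + 3 : Nat) : Int) + 1 - 3).toNat = k + 1 from by omega,
        show (((k + 3 : Nat) : Int) + 1 - 4).toNat = k from by omega]
    rw [wseq_eq_mod]
    have hs : Ssum (k + 3) = dseq (k + 3) + dseq (k + 2) + dseq (k + 1) + dseq k := rfl
    rw [hs]
    simp only [pvMOD]
    omega

lemma A_step (m' n : Nat) (h : n < m') :
    stepA ((List.range (n+1)).map dseq ++ List.replicate (m' - n) 0) ((n : Int) + 1)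
      = (List.range (n+1+1)).map dseq ++ List.replicate (m' - (n+1)) 0 := by
  simp only [stepA]
  have hrep : List.replicate (m' - n) (0:Int) = 0 :: List.replicate (m' - (n+1)) 0 := by
    rw [← List.replicate_succ]; congr 1; omega
  rw [PySem.List.pySetD_of_nonneg _ _ (by omega)]
  rw [show ((n : Int) + 1).toNat = n + 1 from by omega]
  have hval := valA m' n (by omega)
  simp only [valAexpr, pymod_eq] at hval
  simp only [pymod_eq]
  rw [hval]
  conv_lhs => rw [hrep]
  rw [List.set_append_right _ _ (by simp)]
  simp only [List.length_map, List.length_range, Nat.sub_self, List.set_cons_zero]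
  rw [List.range_succ (n := n + 1), List.map_append]
  simp [dseq_succ]

lemma A_inv (m' n : Nat) (h : n ≤ m') :
    (PySem.List.pyRange 1 ((n : Int) + 1) 1).foldl stepA (1 :: List.replicate m' 0)
      = (List.range (n + 1)).map dseq ++ List.replicate (m' - n) 0 := by
  induction n with
  | zero =>
    rw [PySem.List.pyRange_one_eq_nil (by norm_num)]
    simp [dseq]
  | succ n ih =>
    have hcast : ((n + 1 : Nat) : Int) + 1 = ((n : Int) + 1) + 1 := by push_cast; ring
    rw [hcast, PySem.List.pyRange_one_succ_right (by omega), List.foldl_append, ih (by omega)]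
    simp only [List.foldl_cons, List.foldl_nil]
    exact A_step m' n (by omega)

-- ===== VERDICT (by name: the statement is the Claim_ definition above) =====
theorem generate_block_configs_spec : Claim_equal_generate_block_configs := by
  intro m _ hpre
  unfold Spec_generate_block_configs
  obtain ⟨n, rfl⟩ : ∃ n : Nat, m = (n : Int) := ⟨m.toNat, (Int.toNat_of_nonneg hpre).symm⟩
  have hinit : PySem.List.pySetD (List.replicate ((n : Int) + 1).toNat (0 : Int)) 0 1
      = 1 :: List.replicate n 0 := by
    rw [show ((n : Int) + 1).toNat = n + 1 from by omega,
        PySem.List.pySetD_of_nonneg _ _ (by norm_num), List.replicate_succ]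
    simp
  show (PySem.List.pyRange 1 ((n : Int) + 1) 1).foldl stepA
      (PySem.List.pySetD (List.replicate ((n : Int) + 1).toNat (0 : Int)) 0 1)
      = ((PySem.List.pyRange 1 ((n : Int) + 1) 1).foldl stepB ([1], 1)).1
  rw [hinit, A_inv n n le_rfl, B_inv n]
  simp
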